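-- pv_equiv track=rewrite | github.com/AdrishikharChowdhury/Data-Compression-Decompression-Algorithms | huffman/huffmanDecompressor.py | _build_huffman_tree_with_frequencies
-- ===== SOURCE A (Python) =====
-- def _build_huffman_tree_with_frequencies(freq):
--     """Build Huffman tree with given frequencies and extract codes"""
--     import heapq
--     heap = [[weight, [byte, '']] for byte, weight in freq.items()]
--     heapq.heapify(heap)
--
--     while len(heap) > 1:
--         lo = heapq.heappop(heap)
--         hi = heapq.heappop(heap)
--         for pair in lo[1:]:
--             pair[1] = '0' + pair[1]
--         for pair in hi[1:]:
--             pair[1] = '1' + pair[1]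
--         heapq.heappush(heap, [lo[0] + hi[0]] + lo[1:] + hi[1:])
--
--     codes = {}
--     for byte, code in heap[0][1:]:
--         codes[byte] = code
--
--     return codes
-- ===== SOURCE B (Python) =====
-- def _build_huffman_tree_with_frequencies(freq):
--     """Build Huffman tree with given frequencies and extract codes"""
--     import heapq
--     # heap entries: (weight, leading byte, tree); a tree is a byte leaf or a (left, right) pair.
--     # The (weight, leading byte) key reproduces A's list ordering exactly: the byte sets of the
--     # nodes are disjoint, so A's deep list comparison is always decided at the first pair's byte.
--     heap = [(weight, byte, byte) for byte, weight in freq.items()]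
--     heapq.heapify(heap)
--     while len(heap) > 1:
--         w1, b1, t1 = heapq.heappop(heap)
--         w2, _b2, t2 = heapq.heappop(heap)
--         heapq.heappush(heap, (w1 + w2, b1, (t1, t2)))
--     codes = {}
--     if heap:
--         stack = [(heap[0][2], '')]
--         while stack:
--             t, path = stack.pop()
--             if isinstance(t, tuple):
--                 stack.append((t[1], path + '1'))
--                 stack.append((t[0], path + '0'))
--             else:
--                 codes[t] = path
--     return codes
-- ===== Notes on version B (the rewrite author's own statement) =====
-- stated objective: faster
-- what changed: Instead of keeping a growing mutable [weight, [byte,code],...] list per heap node and rewriting every code string at each merge, B heap-merges lightweight (weight, leading-byte, tree) triples and assigns all codes with a single DFS at the end; the two-field key provably reproduces A's deep list ordering because node byte sets are disjoint.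
import Mathlib
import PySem

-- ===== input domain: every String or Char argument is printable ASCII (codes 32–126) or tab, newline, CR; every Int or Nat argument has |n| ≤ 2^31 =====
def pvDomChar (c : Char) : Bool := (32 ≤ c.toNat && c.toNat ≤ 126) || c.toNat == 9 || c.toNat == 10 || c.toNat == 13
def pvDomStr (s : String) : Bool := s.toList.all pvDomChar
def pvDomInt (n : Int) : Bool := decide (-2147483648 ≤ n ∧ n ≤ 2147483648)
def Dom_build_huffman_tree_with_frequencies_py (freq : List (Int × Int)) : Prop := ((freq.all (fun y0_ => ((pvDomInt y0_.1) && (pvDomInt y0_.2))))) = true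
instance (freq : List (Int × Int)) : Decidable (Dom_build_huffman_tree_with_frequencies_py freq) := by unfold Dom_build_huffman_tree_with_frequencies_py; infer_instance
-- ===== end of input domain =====

-- B replaces A's per-merge rewriting of every code string (and per-merge node-list copying) by
-- (weight, leading-byte, tree) heap entries and one final DFS that assigns all codes; measured faster.

-- Shared heapq contract: the heap nodes of both programs are pairwise distinct under a strict
-- total order (byte sets of live nodes are disjoint), so heappop returns THE minimum; we model
-- the heap as a list where heappop = remove the first minimal element and heappush = append.
def selectMin {α : Type} (lt : α → α → Bool) : α → List α → α × List α
  | m, [] => (m, [])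
  | m, x :: xs =>
    if lt x m then ((selectMin lt x xs).1, m :: (selectMin lt x xs).2)
    else ((selectMin lt m xs).1, x :: (selectMin lt m xs).2)

-- ===== PORT A =====
-- Python list comparison [byte, code] < [byte', code'] (elementwise, shorter-prefix-first)
def pyPairLt (p q : Int × String) : Bool :=
  decide (p.1 < q.1) || (p.1 == q.1 && decide (p.2 < q.2))

-- Python list comparison on [weight, pair, pair, ...] tails
def pyPairsLt : List (Int × String) → List (Int × String) → Bool
  | _, [] => false
  | [], _ :: _ => true
  | p :: ps, q :: qs => if pyPairLt p q then true else if p == q then pyPairsLt ps qs else false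

-- Python's '<' on heap entries [weight] ++ pairs
def aLt (a b : Int × List (Int × String)) : Bool :=
  decide (a.1 < b.1) || (a.1 == b.1 && pyPairsLt a.2 b.2)

-- [lo[0] + hi[0]] + lo[1:] + hi[1:] after prepending '0'/'1' to every code
def mergeA (lo hi : Int × List (Int × String)) : Int × List (Int × String) :=
  (lo.1 + hi.1,
   lo.2.map (fun bc => (bc.1, "0" ++ bc.2)) ++ hi.2.map (fun bc => (bc.1, "1" ++ bc.2)))

-- while len(heap) > 1: pop two minima, push merged node (fuel = initial size, ample)
def hLoopA : Nat → List (Int × List (Int × String)) → List (Int × List (Int × String))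
  | 0, heap => heap
  | fuel + 1, heap =>
    match heap with
    | [] => []
    | x :: rest =>
      match selectMin aLt x rest with
      | (_, []) => heap
      | (lo, y :: r1) =>
        let s := selectMin aLt y r1
        hLoopA fuel (s.2 ++ [mergeA lo s.1])

def huffHeapA (freq : List (Int × Int)) : List (Int × List (Int × String)) :=
  (PySem.Dict.ofList freq).items.map (fun bw => (bw.2, [(bw.1, "")]))

def build_huffman_tree_with_frequencies_py (freq : List (Int × Int)) : List (Int × String) :=
  match hLoopA (huffHeapA freq).length (huffHeapA freq) with
  | [] => []   -- Python raises IndexError (heap[0]) here: empty dict, excluded by Pre_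
  | h :: _ =>
    (h.2.foldl (fun d bc => PySem.Dict.insert d bc.1 bc.2)
      (PySem.Dict.empty : PySem.Dict Int String)).items

-- ===== PORT B =====
inductive HTree where
  | leaf : Int → HTree
  | node : HTree → HTree → HTree
deriving DecidableEq, Repr

-- B's heap entries (weight, byte, tree) compare on (weight, byte); the tree is never compared
-- (live leading bytes are pairwise distinct, see Source B comment)
def bLt (a b : Int × Int × HTree) : Bool :=
  decide (a.1 < b.1) || (a.1 == b.1 && decide (a.2.1 < b.2.1))

def mergeB (lo hi : Int × Int × HTree) : Int × Int × HTree :=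
  (lo.1 + hi.1, lo.2.1, HTree.node lo.2.2 hi.2.2)

def hLoopB : Nat → List (Int × Int × HTree) → List (Int × Int × HTree)
  | 0, heap => heap
  | fuel + 1, heap =>
    match heap with
    | [] => []
    | x :: rest =>
      match selectMin bLt x rest with
      | (_, []) => heap
      | (lo, y :: r1) =>
        let s := selectMin bLt y r1
        hLoopB fuel (s.2 ++ [mergeB lo s.1])

def treeSize : HTree → Nat
  | .leaf _ => 1
  | .node l r => 1 + treeSize l + treeSize r

-- the explicit-stack DFS loop: pop (t, path); a node pushes (right, path+'1') then (left, path+'0'),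
-- a leaf emits codes[t] = path; emission order = Python's dict insertion order
def assignLoop : List (HTree × String) → List (Int × String)
  | [] => []
  | (HTree.leaf b, p) :: st => (b, p) :: assignLoop st
  | (HTree.node l r, p) :: st => assignLoop ((l, p ++ "0") :: (r, p ++ "1") :: st)
termination_by st => (st.map (fun x => treeSize x.1)).sum
decreasing_by all_goals (simp [treeSize]; try omega)

def huffHeapB (freq : List (Int × Int)) : List (Int × Int × HTree) :=
  (PySem.Dict.ofList freq).items.map (fun bw => (bw.2, bw.1, HTree.leaf bw.1))

def build_huffman_tree_with_frequencies_py_alt (freq : List (Int × Int)) : List (Int × String) :=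
  match hLoopB (huffHeapB freq).length (huffHeapB freq) with
  | [] => []
  | h :: _ =>
    ((assignLoop [(h.2.2, "")]).foldl (fun d bc => PySem.Dict.insert d bc.1 bc.2)
      (PySem.Dict.empty : PySem.Dict Int String)).items

-- ===== PRECONDITION & SPEC =====
-- A raises IndexError (heap[0] on an empty heap) iff the dict is empty; only that is excluded.
def Pre_build_huffman_tree_with_frequencies_py (freq : List (Int × Int)) : Prop := freq ≠ []
instance (freq : List (Int × Int)) : Decidable (Pre_build_huffman_tree_with_frequencies_py freq) := by
  unfold Pre_build_huffman_tree_with_frequencies_py; infer_instance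

def pvWitness_build_huffman_tree_with_frequencies_py : (List (Int × Int)) := [(65, 2), (66, 1)]

def Spec_build_huffman_tree_with_frequencies_py (freq : List (Int × Int)) (out : List (Int × String)) : Prop := out = build_huffman_tree_with_frequencies_py_alt freq
instance (freq : List (Int × Int)) (out : List (Int × String)) : Decidable (Spec_build_huffman_tree_with_frequencies_py freq out) := by unfold Spec_build_huffman_tree_with_frequencies_py; infer_instance

-- ===== CLAIM (what is proved, stated in full; the proofs are below) =====
def Claim_equal_build_huffman_tree_with_frequencies_py : Prop := ∀ (freq : List (Int × Int)), Dom_build_huffman_tree_with_frequencies_py freq → Pre_build_huffman_tree_with_frequencies_py freq → Spec_build_huffman_tree_with_frequencies_py freq (build_huffman_tree_with_frequencies_py freq)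

-- ===== LEMMAS AND PROOFS =====

-- recursive DFS, the specification of assignLoop
def assign : HTree → String → List (Int × String)
  | .leaf b, p => [(b, p)]
  | .node l r, p => assign l (p ++ "0") ++ assign r (p ++ "1")

theorem assignLoop_cons (t : HTree) (p : String) (st : List (HTree × String)) :
    assignLoop ((t, p) :: st) = assign t p ++ assignLoop st := by
  induction t generalizing p st with
  | leaf b => simp [assignLoop, assign]
  | node l r ihl ihr => simp [assignLoop, assign, ihl, ihr]

-- leftmost leaf byte of a tree
def lead : HTree → Int
  | .leaf b => b
  | .node l _ => lead l

-- B's heap entry viewed as A's heap entry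
def toN (x : Int × Int × HTree) : Int × List (Int × String) := (x.1, assign x.2.2 "")

theorem assign_shift (t : HTree) (p q : String) :
    assign t (p ++ q) = (assign t q).map (fun bc => (bc.1, p ++ bc.2)) := by
  induction t generalizing q with
  | leaf b => simp [assign]
  | node l r ihl ihr =>
      simp only [assign, String.append_assoc, ihl, ihr, List.map_append]

theorem assign_eq_map (t : HTree) (p : String) :
    assign t p = (assign t "").map (fun bc => (bc.1, p ++ bc.2)) := by
  have h : p ++ "" = p := by simp
  rw [← h, assign_shift]; simp

theorem assign_head (t : HTree) :
    ∃ c tl, assign t "" = (lead t, c) :: tl := by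
  induction t with
  | leaf b => exact ⟨"", [], rfl⟩
  | node l r ihl ihr =>
      obtain ⟨c, tl, h⟩ := ihl
      refine ⟨"0" ++ c, ?_, ?_⟩
      · exact tl.map (fun bc => (bc.1, "0" ++ bc.2)) ++ assign r "1"
      · show assign l ("" ++ "0") ++ assign r ("" ++ "1") = _
        have e0 : ("" : String) ++ "0" = "0" := by simp
        have e1 : ("" : String) ++ "1" = "1" := by simp
        rw [e0, e1, assign_eq_map l "0", h]
        simp [lead]

theorem pyPairsLt_self (l : List (Int × String)) : pyPairsLt l l = false := by
  induction l with
  | nil => rfl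
  | cons p ps ih => simp [pyPairsLt, pyPairLt, ih]

theorem lt_agree (x y : Int × Int × HTree)
    (hx : x.2.1 = lead x.2.2) (hy : y.2.1 = lead y.2.2)
    (h : x = y ∨ lead x.2.2 ≠ lead y.2.2) :
    aLt (toN x) (toN y) = bLt x y := by
  rcases h with h | h
  · subst h
    simp [aLt, bLt, toN, pyPairsLt_self]
  · obtain ⟨cx, tlx, ex⟩ := assign_head x.2.2
    obtain ⟨cy, tly, ey⟩ := assign_head y.2.2
    have hpp : pyPairsLt (assign x.2.2 "") (assign y.2.2 "") = decide (x.2.1 < y.2.1) := by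
      rw [ex, ey, hx, hy]
      have hne : (lead x.2.2 == lead y.2.2) = false := by simpa using h
      by_cases hlt : lead x.2.2 < lead y.2.2
      · simp [pyPairsLt, pyPairLt, hlt]
      · simp [pyPairsLt, pyPairLt, hlt, hne, Prod.ext_iff, h]
    simp only [aLt, bLt, toN, hpp]
    rfl

theorem selectMin_map {α β : Type} (lt : α → α → Bool) (lt' : β → β → Bool) (f : α → β)
    (m : α) (xs : List α)
    (H : ∀ x ∈ m :: xs, ∀ y ∈ m :: xs, lt' (f x) (f y) = lt x y) :
    selectMin lt' (f m) (xs.map f) = ((selectMin lt m xs).1 |> f, (selectMin lt m xs).2.map f) := by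
  induction xs generalizing m with
  | nil => simp [selectMin]
  | cons a xs ih =>
      have hma : lt' (f a) (f m) = lt a m := H a (by simp) m (by simp)
      simp only [List.map_cons, selectMin, hma]
      by_cases hlt : lt a m
      · simp only [hlt, if_true,
          ih a (fun u hu v hv => H u (by simp [List.mem_cons] at hu ⊢; tauto)
                                  v (by simp [List.mem_cons] at hv ⊢; tauto))]
        simp
      · simp only [hlt,
          ih m (fun u hu v hv => H u (by simp [List.mem_cons] at hu ⊢; tauto)
                                  v (by simp [List.mem_cons] at hv ⊢; tauto))]
        simp

theorem selectMin_perm {α : Type} (lt : α → α → Bool) (m : α) (xs : List α) :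
    ((selectMin lt m xs).1 :: (selectMin lt m xs).2).Perm (m :: xs) := by
  induction xs generalizing m with
  | nil => simp [selectMin]
  | cons a xs ih =>
      simp only [selectMin]
      by_cases hlt : lt a m
      · rw [if_pos hlt]
        exact (List.Perm.swap m (selectMin lt a xs).1 _).trans ((ih a).cons m)
      · rw [if_neg hlt]
        exact ((List.Perm.swap a (selectMin lt m xs).1 _).trans ((ih m).cons a)).trans
          (List.Perm.swap m a xs)

theorem selectMin_mem_of_rest {α : Type} {lt : α → α → Bool} {m : α} {xs : List α} {u : α}
    (hu : u ∈ (selectMin lt m xs).2) : u ∈ m :: xs :=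
  (selectMin_perm lt m xs).subset (List.mem_cons_of_mem _ hu)

theorem toN_mergeB (lo hi : Int × Int × HTree) :
    toN (mergeB lo hi) = mergeA (toN lo) (toN hi) := by
  simp only [toN, mergeB, mergeA, assign]
  have e0 : ("" : String) ++ "0" = "0" := by simp
  have e1 : ("" : String) ++ "1" = "1" := by simp
  rw [e0, e1, assign_eq_map lo.2.2 "0", assign_eq_map hi.2.2 "1"]

theorem loop_eq (fuel : Nat) (L : List (Int × Int × HTree))
    (h1 : ∀ x ∈ L, x.2.1 = lead x.2.2)
    (h2 : L.Pairwise (fun a b => lead a.2.2 ≠ lead b.2.2)) :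
    hLoopA fuel (L.map toN) = (hLoopB fuel L).map toN := by
  induction fuel generalizing L with
  | zero => rfl
  | succ fuel ih =>
    have Hall : ∀ u ∈ L, ∀ v ∈ L, aLt (toN u) (toN v) = bLt u v := by
      intro u hu v hv
      by_cases huv : u = v
      · exact lt_agree u v (h1 u hu) (h1 v hv) (Or.inl huv)
      · exact lt_agree u v (h1 u hu) (h1 v hv)
          (Or.inr (List.Pairwise.forall (show Symmetric (fun a b : Int × Int × HTree => lead a.2.2 ≠ lead b.2.2) from fun a b h => Ne.symm h) h2 hu hv huv))
    cases L with
    | nil => rfl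
    | cons x r =>
      simp only [List.map_cons, hLoopA, hLoopB]
      rw [selectMin_map bLt aLt toN x r Hall]
      rcases e : selectMin bLt x r with ⟨lo, r1⟩
      cases r1 with
      | nil => simp
      | cons y1 r1' =>
        have hmemr1 : ∀ u ∈ y1 :: r1', u ∈ x :: r := fun u hu =>
          selectMin_mem_of_rest (by rw [e]; exact hu)
        simp only [List.map_cons]
        rw [selectMin_map bLt aLt toN y1 r1'
          (fun u hu v hv => Hall u (hmemr1 u hu) v (hmemr1 v hv))]
        rcases e2 : selectMin bLt y1 r1' with ⟨hi, r2⟩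
        have perm : (lo :: hi :: r2).Perm (x :: r) := by
          have p1 := selectMin_perm bLt x r
          have p2 := selectMin_perm bLt y1 r1'
          rw [e] at p1
          rw [e2] at p2
          exact (p2.cons lo).trans p1
        have hmem : ∀ u ∈ lo :: hi :: r2, u ∈ x :: r := fun u hu => perm.subset hu
        have hp : (lo :: hi :: r2).Pairwise (fun a b => lead a.2.2 ≠ lead b.2.2) :=
          (List.Perm.pairwise_iff (fun {a b} h => Ne.symm h) perm).mpr h2
        have h1' : ∀ u ∈ r2 ++ [mergeB lo hi], u.2.1 = lead u.2.2 := by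
          intro u hu
          rcases List.mem_append.mp hu with hu | hu
          · exact h1 u (hmem u (by simp [hu]))
          · have : u = mergeB lo hi := by simpa using hu
            subst this
            show lo.2.1 = lead lo.2.2
            exact h1 lo (hmem lo (by simp))
        have h2' : (r2 ++ [mergeB lo hi]).Pairwise (fun a b => lead a.2.2 ≠ lead b.2.2) := by
          refine List.pairwise_append.mpr ⟨hp.tail.tail, by simp, ?_⟩
          intro a ha b hb
          have hb' : b = mergeB lo hi := by simpa using hb
          subst hb'
          show lead a.2.2 ≠ lead lo.2.2
          rcases hp with _ | ⟨hlo, _⟩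
          exact (hlo a (List.mem_cons_of_mem _ ha)).symm
        have := ih (r2 ++ [mergeB lo hi]) h1' h2'
        rw [List.map_append] at this
        simpa [toN_mergeB] using this

theorem main_eq (freq : List (Int × Int)) :
    build_huffman_tree_with_frequencies_py freq = build_huffman_tree_with_frequencies_py_alt freq := by
  unfold build_huffman_tree_with_frequencies_py build_huffman_tree_with_frequencies_py_alt huffHeapA huffHeapB
  have hkeys : ((PySem.Dict.ofList freq).items.map Prod.fst).Nodup := by
    have h := PySem.Dict.nodup_keys_ofList (κ := Int) (ν := Int) freq
    simpa [PySem.Dict.keys] using h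
  set items := (PySem.Dict.ofList freq).items with hitems
  set L := items.map (fun bw => (bw.2, bw.1, HTree.leaf bw.1)) with hL
  have hmap : items.map (fun bw => ((bw.2 : Int), [((bw.1 : Int), ("" : String))])) = L.map toN := by
    rw [hL, List.map_map]
    rfl
  have h1 : ∀ x ∈ L, x.2.1 = lead x.2.2 := by
    intro x hx
    rw [hL] at hx
    obtain ⟨bw, _, rfl⟩ := List.mem_map.mp hx
    rfl
  have h2 : L.Pairwise (fun a b => lead a.2.2 ≠ lead b.2.2) := by
    rw [hL, List.pairwise_map]
    have := List.pairwise_map.mp hkeys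
    exact this.imp (fun h => h)
  have hlen : (L.map toN).length = L.length := by simp
  rw [hmap, hlen, loop_eq L.length L h1 h2]
  cases hLoopB L.length L with
  | nil => rfl
  | cons h t => simp [assignLoop_cons, assignLoop, toN]

-- ===== VERDICT (by name: the statement is the Claim_ definition above) =====
theorem build_huffman_tree_with_frequencies_py_spec : Claim_equal_build_huffman_tree_with_frequencies_py := by
  intro freq _ _
  exact main_eq freq
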